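-- pv_equiv track=rewrite | github.com/UmutAcarLab/oac | plotter.py | create_plot_file
-- ===== SOURCE A (Python) =====
-- def create_plot_file(curr_list):
--   header = "\\begin{figure*}[htbp]\n\t\centering\n"
--   footer = "\caption{Size vs. Time plots}\n\end{figure*}\n"
--   count = 0
--   s=""
--   for x in curr_list:
--     if count % 3 == 0:
--       s+=header
--     s+="\t\includegraphics[width=0.3\linewidth]"
--     s+="{plots/%s.inset.png}\quad\n"%(x)
--     count+=1
--     if count % 3 == 0:
--       s+=footer
--   if count % 3 != 0:
--     s+=footer
--   return s
-- ===== SOURCE B (Python) =====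
-- def create_plot_file(curr_list):
--   header = "\\begin{figure*}[htbp]\n\t\centering\n"
--   footer = "\caption{Size vs. Time plots}\n\end{figure*}\n"
--   parts = []
--   for i in range(0, len(curr_list), 3):
--     parts.append(header)
--     for x in curr_list[i:i+3]:
--       parts.append("\t\includegraphics[width=0.3\linewidth]{plots/%s.inset.png}\quad\n" % (x,))
--     parts.append(footer)
--   return "".join(parts)
-- ===== Notes on version B (the rewrite author's own statement) =====
-- stated objective: simpler
-- what changed: Replaces the flat loop with a count % 3 counter, an in-loop footer append and a post-loop trailing-footer special case by iterating over explicit 3-element chunks, emitting header, image lines and footer uniformly per chunk, joined at the end.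
import Mathlib
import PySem

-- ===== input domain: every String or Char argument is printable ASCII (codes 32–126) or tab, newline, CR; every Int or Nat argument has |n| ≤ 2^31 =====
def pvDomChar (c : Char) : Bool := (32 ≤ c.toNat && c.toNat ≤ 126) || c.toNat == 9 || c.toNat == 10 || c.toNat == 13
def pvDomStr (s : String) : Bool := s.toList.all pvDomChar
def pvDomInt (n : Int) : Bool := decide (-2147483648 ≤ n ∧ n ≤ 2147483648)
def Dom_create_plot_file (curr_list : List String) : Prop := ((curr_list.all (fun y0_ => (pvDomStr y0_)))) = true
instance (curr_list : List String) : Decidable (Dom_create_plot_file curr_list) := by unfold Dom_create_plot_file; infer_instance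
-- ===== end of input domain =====

-- B replaces A's modular counter and post-loop trailing-footer patch by iterating over
-- explicit 3-element chunks, emitting header, images and footer uniformly per chunk (objective: simpler).

-- shared string literals of both Pythons
def pvHeader : String := "\\begin{figure*}[htbp]\n\t\\centering\n"
def pvFooter : String := "\\caption{Size vs. Time plots}\n\\end{figure*}\n"
def pvImg (x : String) : String :=
  "\t\\includegraphics[width=0.3\\linewidth]" ++ ("{plots/" ++ x ++ ".inset.png}\\quad\n")

-- ===== PORT A =====
-- A's loop state: (count, s); footer appended inside the loop when count % 3 hits 0, and
-- once more after the loop if count % 3 ≠ 0.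
def pvStepA (st : Int × String) (x : String) : Int × String :=
  let s := if st.1 % 3 = 0 then st.2 ++ pvHeader else st.2
  let s := s ++ pvImg x
  let count := st.1 + 1
  let s := if count % 3 = 0 then s ++ pvFooter else s
  (count, s)

def create_plot_file (curr_list : List String) : String :=
  let r := curr_list.foldl pvStepA (0, "")
  if r.1 % 3 ≠ 0 then r.2 ++ pvFooter else r.2

-- ===== PORT B =====
-- Source B's chunk loop: each step takes the next ≤3 names, wraps them in header/footer.
def pvChunks : List String → String
  | [] => ""
  | x :: rest =>
      pvHeader ++ ((x :: rest).take 3).foldl (fun s y => s ++ pvImg y) "" ++ pvFooter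
        ++ pvChunks (rest.drop 2)
termination_by l => l.length
decreasing_by simp

def create_plot_file_alt (curr_list : List String) : String := pvChunks curr_list

-- ===== PRECONDITION & SPEC =====
def Spec_create_plot_file (curr_list : List String) (out : String) : Prop := out = create_plot_file_alt curr_list
instance (curr_list : List String) (out : String) : Decidable (Spec_create_plot_file curr_list out) := by unfold Spec_create_plot_file; infer_instance

-- ===== CLAIM (what is proved, stated in full; the proofs are below) =====
def Claim_equal_create_plot_file : Prop := ∀ (curr_list : List String), Dom_create_plot_file curr_list → Spec_create_plot_file curr_list (create_plot_file curr_list)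

-- ===== LEMMAS AND PROOFS =====

theorem pvChunks_nil : pvChunks [] = "" := by rw [pvChunks]

theorem pvChunks_cons (x : String) (rest : List String) :
    pvChunks (x :: rest)
      = pvHeader ++ ((x :: rest).take 3).foldl (fun s y => s ++ pvImg y) "" ++ pvFooter
          ++ pvChunks (rest.drop 2) := by
  rw [pvChunks]

-- A's loop from any state (c, s) with c % 3 = 0, followed by A's post-loop footer fix,
-- produces s ++ (B's chunked output).
theorem pv_key : ∀ (n : Nat) (l : List String), l.length ≤ n → ∀ (c : Int) (s : String),
    c % 3 = 0 →
    (let r := l.foldl pvStepA (c, s); if r.1 % 3 ≠ 0 then r.2 ++ pvFooter else r.2)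
      = s ++ pvChunks l := by
  intro n
  induction n with
  | zero =>
    intro l hl c s hc
    have : l = [] := List.eq_nil_of_length_eq_zero (Nat.le_zero.mp hl)
    subst this
    simp [pvChunks_nil, hc]
  | succ n ih =>
    intro l hl c s hc
    match l with
    | [] => simp [pvChunks_nil, hc]
    | [a] =>
      have h1 : (c + 1) % 3 ≠ 0 := by omega
      simp only [List.foldl, pvStepA, hc, if_pos, if_neg h1]
      simp [h1, pvChunks_cons, pvChunks_nil, String.append_assoc]
    | [a, b] =>
      have h1 : (c + 1) % 3 ≠ 0 := by omega
      have h2 : (c + 1 + 1) % 3 ≠ 0 := by omega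
      simp only [List.foldl, pvStepA, hc, if_pos, if_neg h1, if_neg h2]
      simp [h2, pvChunks_cons, pvChunks_nil, String.append_assoc]
    | a :: b :: d :: rest =>
      have h1 : (c + 1) % 3 ≠ 0 := by omega
      have h2 : (c + 1 + 1) % 3 ≠ 0 := by omega
      have h3 : (c + 1 + 1 + 1) % 3 = 0 := by omega
      have hlen : rest.length ≤ n := by simp at hl; omega
      have := ih rest hlen (c + 1 + 1 + 1)
        (s ++ pvHeader ++ pvImg a ++ pvImg b ++ pvImg d ++ pvFooter) h3
      simp only [List.foldl, pvStepA, hc, if_pos, if_neg h1, if_neg h2, h3] at this ⊢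
      rw [pvChunks_cons]
      simp only [List.take_succ_cons, List.take_zero, List.drop_succ_cons, List.drop_zero,
        List.foldl] at this ⊢
      rw [this]
      simp [String.append_assoc]

-- ===== VERDICT (by name: the statement is the Claim_ definition above) =====
theorem create_plot_file_spec : Claim_equal_create_plot_file := by
  intro l _
  unfold Spec_create_plot_file create_plot_file create_plot_file_alt
  have := pv_key l.length l le_rfl 0 "" (by decide)
  simpa using this
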